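-- pv_equiv track=rewrite | github.com/pieper/slicer-wgpu | slicer_wgpu/shadows.py | _emit_field_bindings
-- ===== SOURCE A (Python) =====
-- def _emit_field_bindings(n_fields: int, first_binding: int) -> str:
--     """Per-ImageField bindings: 1 uniform buf + 3 sampler+texture pairs = 7 slots."""
--     lines = []
--     for i in range(n_fields):
--         base = first_binding + 7 * i
--         lines.append(
--             f"@group(0) @binding({base + 0}) var<uniform> u_if{i}: ImageFieldCompute;"
--             f"\n@group(0) @binding({base + 1}) var s_vol{i}: sampler;"
--             f"\n@group(0) @binding({base + 2}) var t_vol{i}: texture_3d<f32>;"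
--             f"\n@group(0) @binding({base + 3}) var s_lut{i}: sampler;"
--             f"\n@group(0) @binding({base + 4}) var t_lut{i}: texture_1d<f32>;"
--             f"\n@group(0) @binding({base + 5}) var s_grad_lut{i}: sampler;"
--             f"\n@group(0) @binding({base + 6}) var t_grad_lut{i}: texture_1d<f32>;"
--         )
--     return "\n".join(lines)
-- ===== SOURCE B (Python) =====
-- _SLOTS = [
--     ("var<uniform> u_if", ": ImageFieldCompute;"),
--     ("var s_vol", ": sampler;"),
--     ("var t_vol", ": texture_3d<f32>;"),
--     ("var s_lut", ": sampler;"),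
--     ("var t_lut", ": texture_1d<f32>;"),
--     ("var s_grad_lut", ": sampler;"),
--     ("var t_grad_lut", ": texture_1d<f32>;"),
-- ]
--
--
-- def _emit_field_bindings(n_fields: int, first_binding: int) -> str:
--     lines = []
--     for i in range(n_fields):
--         for off, (prefix, suffix) in enumerate(_SLOTS):
--             lines.append(
--                 f"@group(0) @binding({first_binding + 7 * i + off}) {prefix}{i}{suffix}"
--             )
--     return "\n".join(lines)
-- ===== Notes on version B (the rewrite author's own statement) =====
-- stated objective: simpler
-- what changed: Replaces A's single hard-coded 7-line f-string block per field with a data table of the 7 slot descriptors and a nested loop emitting one flat line per (field, slot) pair, computing each binding as first_binding + 7*i + offset.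
import Mathlib
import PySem

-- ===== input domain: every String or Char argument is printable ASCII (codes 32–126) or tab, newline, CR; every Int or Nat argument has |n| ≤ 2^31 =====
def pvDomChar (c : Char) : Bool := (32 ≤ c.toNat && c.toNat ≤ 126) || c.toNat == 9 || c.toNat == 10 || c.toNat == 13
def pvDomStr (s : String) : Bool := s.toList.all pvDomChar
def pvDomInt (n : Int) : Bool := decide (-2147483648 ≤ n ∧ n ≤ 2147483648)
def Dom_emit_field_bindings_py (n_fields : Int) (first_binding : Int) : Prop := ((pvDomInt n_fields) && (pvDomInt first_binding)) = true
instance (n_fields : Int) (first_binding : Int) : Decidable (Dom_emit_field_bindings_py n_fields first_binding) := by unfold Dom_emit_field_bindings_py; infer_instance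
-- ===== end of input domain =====

-- B replaces A's single 7-line f-string block per field by a table of the 7 slot
-- descriptors, emitting one flat line per (field, slot) pair (objective: simpler).

-- ===== PORT A =====
-- the 7-line block A appends for field i (A's single big f-string literal)
def pvBlockA (first_binding i : Int) : String :=
  let base := first_binding + 7 * i
  "@group(0) @binding(" ++ PySem.Int.toStr (base + 0) ++ ") var<uniform> u_if" ++ PySem.Int.toStr i ++ ": ImageFieldCompute;"
    ++ "\n@group(0) @binding(" ++ PySem.Int.toStr (base + 1) ++ ") var s_vol" ++ PySem.Int.toStr i ++ ": sampler;"
    ++ "\n@group(0) @binding(" ++ PySem.Int.toStr (base + 2) ++ ") var t_vol" ++ PySem.Int.toStr i ++ ": texture_3d<f32>;"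
    ++ "\n@group(0) @binding(" ++ PySem.Int.toStr (base + 3) ++ ") var s_lut" ++ PySem.Int.toStr i ++ ": sampler;"
    ++ "\n@group(0) @binding(" ++ PySem.Int.toStr (base + 4) ++ ") var t_lut" ++ PySem.Int.toStr i ++ ": texture_1d<f32>;"
    ++ "\n@group(0) @binding(" ++ PySem.Int.toStr (base + 5) ++ ") var s_grad_lut" ++ PySem.Int.toStr i ++ ": sampler;"
    ++ "\n@group(0) @binding(" ++ PySem.Int.toStr (base + 6) ++ ") var t_grad_lut" ++ PySem.Int.toStr i ++ ": texture_1d<f32>;"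

def emit_field_bindings_py (n_fields : Int) (first_binding : Int) : String :=
  PySem.Str.join "\n"
    ((PySem.List.pyRange 0 n_fields 1).foldl
      (fun acc i => acc ++ [pvBlockA first_binding i]) [])

-- ===== PORT B =====
def pvSlots : List (String × String) :=
  [("var<uniform> u_if", ": ImageFieldCompute;"),
   ("var s_vol", ": sampler;"),
   ("var t_vol", ": texture_3d<f32>;"),
   ("var s_lut", ": sampler;"),
   ("var t_lut", ": texture_1d<f32>;"),
   ("var s_grad_lut", ": sampler;"),
   ("var t_grad_lut", ": texture_1d<f32>;")]

def emit_field_bindings_py_alt (n_fields : Int) (first_binding : Int) : String :=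
  PySem.Str.join "\n"
    ((PySem.List.pyRange 0 n_fields 1).foldl
      (fun acc i =>
        (PySem.List.enumerate pvSlots 0).foldl
          (fun acc2 os =>
            acc2 ++ ["@group(0) @binding(" ++ PySem.Int.toStr (first_binding + 7 * i + os.1)
              ++ ") " ++ os.2.1 ++ PySem.Int.toStr i ++ os.2.2]) acc) [])

-- ===== PRECONDITION & SPEC =====
def Spec_emit_field_bindings_py (n_fields : Int) (first_binding : Int) (out : String) : Prop := out = emit_field_bindings_py_alt n_fields first_binding
instance (n_fields : Int) (first_binding : Int) (out : String) : Decidable (Spec_emit_field_bindings_py n_fields first_binding out) := by unfold Spec_emit_field_bindings_py; infer_instance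

-- ===== CLAIM (what is proved, stated in full; the proofs are below) =====
def Claim_equal_emit_field_bindings_py : Prop := ∀ (n_fields : Int) (first_binding : Int), Dom_emit_field_bindings_py n_fields first_binding → Spec_emit_field_bindings_py n_fields first_binding (emit_field_bindings_py n_fields first_binding)

-- ===== LEMMAS AND PROOFS =====

-- B's line for slot (off, (prefix, suffix)) of field i
def pvLineB (first_binding i : Int) (os : Int × String × String) : String :=
  "@group(0) @binding(" ++ PySem.Int.toStr (first_binding + 7 * i + os.1)
    ++ ") " ++ os.2.1 ++ PySem.Int.toStr i ++ os.2.2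

-- the 7 lines B emits for field i
def pvBlockB (first_binding i : Int) : List String :=
  (PySem.List.enumerate pvSlots 0).map (pvLineB first_binding i)

lemma portA_eq (n f : Int) :
    emit_field_bindings_py n f =
      PySem.Str.join "\n" ((PySem.List.pyRange 0 n 1).map (pvBlockA f)) := by
  unfold emit_field_bindings_py
  rw [PySem.List.foldl_append_singleton_eq_map]
  simp

lemma portB_eq (n f : Int) :
    emit_field_bindings_py_alt n f =
      PySem.Str.join "\n" ((PySem.List.pyRange 0 n 1).flatMap (pvBlockB f)) := by
  unfold emit_field_bindings_py_alt
  have h : ∀ (acc : List String) (i : Int),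
      (PySem.List.enumerate pvSlots 0).foldl
        (fun acc2 os =>
          acc2 ++ ["@group(0) @binding(" ++ PySem.Int.toStr (f + 7 * i + os.1)
            ++ ") " ++ os.2.1 ++ PySem.Int.toStr i ++ os.2.2]) acc
        = acc ++ pvBlockB f i := by
    intro acc i
    rw [show (fun acc2 (os : Int × String × String) =>
        acc2 ++ ["@group(0) @binding(" ++ PySem.Int.toStr (f + 7 * i + os.1)
          ++ ") " ++ os.2.1 ++ PySem.Int.toStr i ++ os.2.2])
      = fun acc2 os => acc2 ++ [pvLineB f i os] from rfl]
    rw [PySem.List.foldl_append_singleton_eq_map]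
    rfl
  simp only [h]
  rw [PySem.List.foldl_append_eq_flatMap]
  simp

-- join over a concatenation of two nonempty lists of parts
lemma join_append (sep : List Char) (xs ys : List (List Char))
    (hx : xs ≠ []) (hy : ys ≠ []) :
    PySem.Chars.join sep (xs ++ ys) =
      PySem.Chars.join sep xs ++ sep ++ PySem.Chars.join sep ys := by
  induction xs with
  | nil => exact absurd rfl hx
  | cons x xs ih =>
    cases xs with
    | nil =>
      cases ys with
      | nil => exact absurd rfl hy
      | cons y ys =>
        simp [PySem.Chars.join_cons_cons, PySem.Chars.join_singleton]
    | cons x2 xs2 =>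
      simp only [List.cons_append]
      rw [PySem.Chars.join_cons_cons, PySem.Chars.join_cons_cons,
        ← List.cons_append, ih (by simp)]
      simp [List.append_assoc]

-- A's block for field i is exactly B's 7 lines for field i joined with '\n'
set_option maxRecDepth 8000 in
lemma block_eq (f i : Int) :
    (pvBlockA f i).toList =
      PySem.Chars.join "\n".toList ((pvBlockB f i).map String.toList) := by
  simp [pvBlockA, pvBlockB, pvSlots, pvLineB, PySem.List.enumerate,
    PySem.Chars.join_cons_cons, PySem.Chars.join_singleton]

lemma key (f : Int) (r : List Int) :
    PySem.Str.join "\n" (r.map (pvBlockA f)) =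
      PySem.Str.join "\n" (r.flatMap (pvBlockB f)) := by
  refine String.toList_inj.mp ?_
  rw [PySem.Str.toList_join, PySem.Str.toList_join]
  induction r with
  | nil => simp
  | cons i r ih =>
    cases r with
    | nil =>
      simp only [List.map_cons, List.map_nil, List.flatMap_cons, List.flatMap_nil,
        List.append_nil, PySem.Chars.join_singleton]
      exact block_eq f i
    | cons j r2 =>
      simp only [List.map_cons, List.flatMap_cons, List.map_append] at ih ⊢
      rw [PySem.Chars.join_cons_cons,
        join_append _ _ _ (by simp [pvBlockB, pvSlots, PySem.List.enumerate])
          (by simp [pvBlockB, pvSlots, PySem.List.enumerate]),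
        block_eq f i, ih]

-- ===== VERDICT (by name: the statement is the Claim_ definition above) =====
theorem emit_field_bindings_py_spec : Claim_equal_emit_field_bindings_py := by
  intro n f _
  show emit_field_bindings_py n f = emit_field_bindings_py_alt n f
  rw [portA_eq, portB_eq, key]
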